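-- pv_equiv track=rewrite | github.com/Jar1s/ecom-profit-engine | external_tracking.py | _pick_best_carrier_status
-- ===== SOURCE A (Python) =====
-- _CARRIER_FAILURE_TOKENS = frozenset(
--     {
--         "",
--         "notfound",
--         "not found",
--         "unknown",
--         "null",
--         "tracking number format error",
--     }
-- )
--
-- def _pick_best_carrier_status(statuses: list[str]) -> str:
--     """Prefer first non-failure status when an order has multiple tracking numbers."""
--     if not statuses:
--         return ""
--     for s in statuses:
--         t = s.strip()
--         if t and t.lower() not in _CARRIER_FAILURE_TOKENS:
--             return t
--     for s in statuses:
--         if s and s.strip():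
--             return s.strip()
--     return ""
-- ===== SOURCE B (Python) =====
-- _CARRIER_FAILURE_TOKENS = frozenset(
--     {
--         "",
--         "notfound",
--         "not found",
--         "unknown",
--         "null",
--         "tracking number format error",
--     }
-- )
--
-- def _pick_best_carrier_status(statuses: list[str]) -> str:
--     """Prefer first non-failure status; single pass with a fallback accumulator."""
--     fallback = None
--     for s in statuses:
--         t = s.strip()
--         if t and t.lower() not in _CARRIER_FAILURE_TOKENS:
--             return t
--         if t and fallback is None:
--             fallback = t
--     return fallback if fallback is not None else ""
-- ===== Notes on version B (the rewrite author's own statement) =====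
-- stated objective: simpler
-- what changed: Two sequential scans (first non-failure status, then a full second scan for the first non-empty one) are fused into a single pass that keeps one fallback accumulator and strips each string once.
import Mathlib
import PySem

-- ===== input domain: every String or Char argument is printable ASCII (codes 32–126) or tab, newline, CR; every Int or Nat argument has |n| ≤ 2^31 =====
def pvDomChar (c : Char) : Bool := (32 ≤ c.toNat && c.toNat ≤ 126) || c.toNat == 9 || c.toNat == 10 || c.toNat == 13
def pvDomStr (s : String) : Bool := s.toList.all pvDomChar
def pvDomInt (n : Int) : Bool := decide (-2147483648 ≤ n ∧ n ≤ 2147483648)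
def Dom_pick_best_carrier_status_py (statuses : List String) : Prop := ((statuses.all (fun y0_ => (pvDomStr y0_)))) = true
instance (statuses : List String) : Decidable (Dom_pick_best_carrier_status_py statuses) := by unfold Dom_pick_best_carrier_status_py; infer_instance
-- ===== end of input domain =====

-- B fuses A's two sequential scans into one pass with a fallback accumulator (objective: simpler).

-- ===== PORT A =====
def pvFailureTokens : List String :=
  ["", "notfound", "not found", "unknown", "null", "tracking number format error"]

-- first loop of A: return first stripped non-failure status
def pvALoop1 : List String → Option String
  | [] => none
  | s :: rest =>
    let t := PySem.Str.strip s
    if t ≠ "" ∧ PySem.Str.lower t ∉ pvFailureTokens then some t else pvALoop1 rest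

-- second loop of A: return strip of first truthy status with truthy strip
def pvALoop2 : List String → Option String
  | [] => none
  | s :: rest =>
    if s ≠ "" ∧ PySem.Str.strip s ≠ "" then some (PySem.Str.strip s) else pvALoop2 rest

def pick_best_carrier_status_py (statuses : List String) : String :=
  if statuses = [] then ""
  else
    match pvALoop1 statuses with
    | some t => t
    | none =>
      match pvALoop2 statuses with
      | some t => t
      | none => ""

-- ===== PORT B =====
-- single pass carrying the fallback accumulator
def pvBLoop : List String → Option String → String
  | [], fallback => match fallback with | some f => f | none => ""
  | s :: rest, fallback =>
    let t := PySem.Str.strip s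
    if t ≠ "" ∧ PySem.Str.lower t ∉ pvFailureTokens then t
    else pvBLoop rest (if t ≠ "" ∧ fallback = none then some t else fallback)

def pick_best_carrier_status_py_alt (statuses : List String) : String :=
  pvBLoop statuses none

-- ===== PRECONDITION & SPEC =====
def Spec_pick_best_carrier_status_py (statuses : List String) (out : String) : Prop := out = pick_best_carrier_status_py_alt statuses
instance (statuses : List String) (out : String) : Decidable (Spec_pick_best_carrier_status_py statuses out) := by unfold Spec_pick_best_carrier_status_py; infer_instance

-- ===== CLAIM (what is proved, stated in full; the proofs are below) =====
def Claim_equal_pick_best_carrier_status_py : Prop := ∀ (statuses : List String), Dom_pick_best_carrier_status_py statuses → Spec_pick_best_carrier_status_py statuses (pick_best_carrier_status_py statuses)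

-- ===== LEMMAS AND PROOFS =====

lemma strip_empty : PySem.Str.strip "" = "" := by decide

-- B's loop computes: the first-scan result if any, else the fallback, else the second-scan result.
lemma pvBLoop_eq (l : List String) : ∀ (fb : Option String),
    pvBLoop l fb =
      match pvALoop1 l with
      | some t => t
      | none =>
        match fb.orElse (fun _ => pvALoop2 l) with
        | some t => t
        | none => "" := by
  induction l with
  | nil => intro fb; cases fb <;> simp [pvBLoop, pvALoop1, pvALoop2, Option.orElse]
  | cons s rest ih =>
    intro fb
    by_cases h1 : PySem.Str.strip s ≠ "" ∧ PySem.Str.lower (PySem.Str.strip s) ∉ pvFailureTokens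
    · simp [pvBLoop, pvALoop1, h1]
    · have hs2 : (s ≠ "" ∧ PySem.Str.strip s ≠ "") ↔ (PySem.Str.strip s ≠ "") := by
        constructor
        · exact fun h => h.2
        · intro h
          refine ⟨?_, h⟩
          intro hs; rw [hs] at h; exact h strip_empty
      by_cases ht : PySem.Str.strip s = ""
      · simp [pvBLoop, pvALoop1, pvALoop2, ht, ih]
      · -- t nonempty, failure token: fallback may be set
        have hmem : PySem.Str.lower (PySem.Str.strip s) ∈ pvFailureTokens := by
          by_contra hm; exact h1 ⟨ht, hm⟩
        have hsne : s ≠ "" := (hs2.mpr ht).1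
        cases fb with
        | none =>
          simp [pvBLoop, pvALoop1, pvALoop2, ht, hmem, hsne, ih, Option.orElse]
        | some f =>
          simp [pvBLoop, pvALoop1, ht, hmem, ih, Option.orElse]

-- ===== VERDICT (by name: the statement is the Claim_ definition above) =====
theorem pick_best_carrier_status_py_spec : Claim_equal_pick_best_carrier_status_py := by
  intro statuses _
  unfold Spec_pick_best_carrier_status_py pick_best_carrier_status_py pick_best_carrier_status_py_alt
  rw [pvBLoop_eq]
  cases statuses with
  | nil => simp [pvALoop1, pvALoop2, Option.orElse]
  | cons s rest =>
    simp only [if_neg (List.cons_ne_nil s rest)]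
    cases pvALoop1 (s :: rest) <;> simp [Option.orElse]
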